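-- pv_equiv track=rewrite | github.com/Wewoll/TIC | utils.py | genMatrizOcurrencias
-- ===== SOURCE A (Python) =====
-- def genAlfabeto(cadena):
--     alfabeto = []
--     for simbolo in cadena:
--         if simbolo not in alfabeto:
--             alfabeto.append(simbolo)
--     alfabeto.sort()
--     return alfabeto
--
-- def genMatrizOcurrencias(cadena):
--     alfabeto = genAlfabeto(cadena)
--     N = len(alfabeto)
--     matriz_ocurrencias = [[0 for _ in range(N)] for _ in range(N)]
--
--     for i in range(len(cadena) - 1):
--         origen = alfabeto.index(cadena[i])
--         destino = alfabeto.index(cadena[i + 1])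
--         matriz_ocurrencias[destino][origen] += 1
--
--     return matriz_ocurrencias
-- ===== SOURCE B (Python) =====
-- def genMatrizOcurrencias(cadena):
--     conteo = {}
--     for par in zip(cadena, cadena[1:]):
--         conteo[par] = conteo.get(par, 0) + 1
--     alfabeto = sorted(set(cadena))
--     return [[conteo.get((origen, destino), 0) for origen in alfabeto]
--             for destino in alfabeto]
-- ===== Notes on version B (the rewrite author's own statement) =====
-- stated objective: faster
-- what changed: A increments one matrix cell per input step, doing a linear alfabeto.index scan for both symbols at every step; B tallies adjacent pairs into a dict in one pass and then fills the matrix with a comprehension reading each cell's count from the tally.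
import Mathlib
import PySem

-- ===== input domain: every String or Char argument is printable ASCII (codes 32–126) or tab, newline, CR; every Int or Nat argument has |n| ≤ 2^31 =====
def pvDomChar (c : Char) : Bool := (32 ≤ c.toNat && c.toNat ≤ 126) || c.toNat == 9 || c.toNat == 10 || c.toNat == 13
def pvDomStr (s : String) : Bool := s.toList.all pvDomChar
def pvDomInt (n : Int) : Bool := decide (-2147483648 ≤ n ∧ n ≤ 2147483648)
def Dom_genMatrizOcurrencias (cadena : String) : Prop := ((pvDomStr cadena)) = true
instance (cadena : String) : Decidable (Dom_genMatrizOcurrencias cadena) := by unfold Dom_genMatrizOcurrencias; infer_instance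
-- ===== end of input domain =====

-- B replaces A's per-step matrix increments (with a linear alfabeto.index scan per step) by a
-- one-pass dict tally over adjacent pairs and a comprehension filling each cell from the tally.

-- ===== PORT A =====
def genAlfabeto (cadena : String) : List Char :=
  let alfabeto := cadena.toList.foldl
    (fun alfabeto simbolo => if alfabeto.contains simbolo then alfabeto else alfabeto ++ [simbolo]) []
  PySem.List.sorted alfabeto (fun x => x) false

def genMatrizOcurrencias (cadena : String) : List (List Int) :=
  let l := cadena.toList
  let alfabeto := genAlfabeto cadena
  let N := alfabeto.length
  let matriz0 := (List.range N).map (fun _ => (List.range N).map (fun _ => (0 : Int)))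
  (PySem.List.pyRange 0 (PySem.List.len l - 1) 1).foldl
    (fun matriz i =>
      match PySem.List.pyGet? l i, PySem.List.pyGet? l (i + 1) with
      | some ci, some ci1 =>
        match PySem.List.index? alfabeto ci, PySem.List.index? alfabeto ci1 with
        | some origen, some destino => matriz.modify destino (fun fila => fila.modify origen (· + 1))
        | _, _ => matriz
      | _, _ => matriz)
    matriz0

-- ===== PORT B =====
def genMatrizOcurrencias_alt (cadena : String) : List (List Int) :=
  let l := cadena.toList
  let conteo := (l.zip (PySem.List.slice l (some 1) none)).foldl
    (fun conteo par => conteo.insert par (conteo.getD par 0 + 1)) PySem.Dict.empty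
  let alfabeto := PySem.List.sorted (PySem.Set.ofList l) (fun x => x) false
  alfabeto.map (fun destino => alfabeto.map (fun origen => conteo.getD (origen, destino) 0))

-- ===== PRECONDITION & SPEC =====
def Spec_genMatrizOcurrencias (cadena : String) (out : List (List Int)) : Prop := out = genMatrizOcurrencias_alt cadena
instance (cadena : String) (out : List (List Int)) : Decidable (Spec_genMatrizOcurrencias cadena out) := by unfold Spec_genMatrizOcurrencias; infer_instance

-- ===== CLAIM (what is proved, stated in full; the proofs are below) =====
def Claim_equal_genMatrizOcurrencias : Prop := ∀ (cadena : String), Dom_genMatrizOcurrencias cadena → Spec_genMatrizOcurrencias cadena (genMatrizOcurrencias cadena)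

-- ===== LEMMAS AND PROOFS =====

-- A's loop body, abstracted over the (destino, origen) index pair it increments.
def pvStep (m : List (List Int)) (p : Nat × Nat) : List (List Int) :=
  m.modify p.1 (fun fila => fila.modify p.2 (· + 1))

-- Cell (d, o) of a matrix, total (getD).
def pvCell (m : List (List Int)) (d o : Nat) : Int := (m.getD d []).getD o 0

lemma pvStep_length (m : List (List Int)) (p : Nat × Nat) : (pvStep m p).length = m.length := by
  simp [pvStep]

lemma pvStep_row (m : List (List Int)) (p : Nat × Nat) (d : Nat) :
    (pvStep m p).getD d [] = if p.1 = d then (m.getD d []).modify p.2 (· + 1) else m.getD d [] := by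
  simp only [pvStep, List.getD_eq_getElem?_getD, List.getElem?_modify]
  cases h : m[d]? <;> split <;> simp

lemma pvCell_step (m : List (List Int)) (p : Nat × Nat) (d o : Nat)
    (ho : o < (m.getD d []).length) :
    pvCell (pvStep m p) d o = pvCell m d o + if p = (d, o) then 1 else 0 := by
  by_cases h1 : p.1 = d
  · rw [pvCell, pvStep_row, if_pos h1, pvCell]
    rw [show ((m.getD d []).modify p.2 (· + 1)).getD o 0
        = (((m.getD d []).modify p.2 (· + 1))[o]?).getD 0 from List.getD_eq_getElem?_getD,
      List.getElem?_modify, List.getElem?_eq_getElem ho,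
      show (m.getD d []).getD o 0 = ((m.getD d [])[o]?).getD 0 from List.getD_eq_getElem?_getD,
      List.getElem?_eq_getElem ho]
    by_cases h2 : p.2 = o
    · have hp : p = (d, o) := Prod.ext_iff.mpr ⟨h1, h2⟩
      simp [h2, hp]
    · have hp : ¬ p = (d, o) := fun hh => h2 (by rw [hh])
      simp [h2, hp]
  · have hp : ¬ p = (d, o) := fun hh => h1 (by rw [hh])
    rw [pvCell, pvStep_row, if_neg h1, pvCell, if_neg hp, add_zero]

lemma pvRow_len_foldl (js : List (Nat × Nat)) : ∀ (m : List (List Int)) (d : Nat),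
    ((js.foldl pvStep m).getD d []).length = (m.getD d []).length := by
  induction js with
  | nil => intro m d; rfl
  | cons p js ih =>
    intro m d
    rw [List.foldl_cons, ih, pvStep_row]
    split <;> simp

lemma pvLen_foldl (js : List (Nat × Nat)) : ∀ (m : List (List Int)),
    (js.foldl pvStep m).length = m.length := by
  induction js with
  | nil => intro m; rfl
  | cons p js ih => intro m; rw [List.foldl_cons, ih, pvStep_length]

lemma pvCell_foldl (js : List (Nat × Nat)) : ∀ (m : List (List Int)) (d o : Nat),
    o < (m.getD d []).length →
    pvCell (js.foldl pvStep m) d o = pvCell m d o + js.count (d, o) := by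
  induction js with
  | nil => intro m d o _; simp
  | cons p js ih =>
    intro m d o ho
    have hb : o < ((pvStep m p).getD d []).length := by
      rw [pvStep_row]; split
      · simpa using ho
      · exact ho
    rw [List.foldl_cons, ih _ d o hb, pvCell_step m p d o ho, List.count_cons]
    by_cases h : p = (d, o)
    · simp only [h, BEq.rfl, if_true]
      push_cast; ring
    · have : ((p == (d, o)) = true) = False := by simp [h]
      simp [h, this]

lemma pvIdxOf?_of_mem {l : List Char} {a : Char} (h : a ∈ l) :
    List.idxOf? a l = some (l.idxOf a) := by
  obtain ⟨k, hk⟩ := Option.isSome_iff_exists.mp ((List.isSome_idxOf?).mpr h)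
  rw [hk, List.idxOf_eq_getD_idxOf?, hk]; rfl

lemma pvMain (l : List Char) :
    (PySem.List.pyRange 0 (PySem.List.len l - 1) 1).foldl
      (fun matriz i =>
        match PySem.List.pyGet? l i, PySem.List.pyGet? l (i + 1) with
        | some ci, some ci1 =>
          match PySem.List.index? (PySem.List.sorted (PySem.Set.ofList l) (fun x => x) false) ci,
                PySem.List.index? (PySem.List.sorted (PySem.Set.ofList l) (fun x => x) false) ci1 with
          | some origen, some destino => matriz.modify destino (fun fila => fila.modify origen (· + 1))
          | _, _ => matriz
        | _, _ => matriz)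
      ((List.range (PySem.List.sorted (PySem.Set.ofList l) (fun x => x) false).length).map
        (fun _ => (List.range (PySem.List.sorted (PySem.Set.ofList l) (fun x => x) false).length).map
          (fun _ => (0 : Int))))
    = (PySem.List.sorted (PySem.Set.ofList l) (fun x => x) false).map
        (fun destino => (PySem.List.sorted (PySem.Set.ofList l) (fun x => x) false).map
          (fun origen =>
            ((l.zip (PySem.List.slice l (some 1) none)).foldl
              (fun conteo par => conteo.insert par (conteo.getD par 0 + 1)) PySem.Dict.empty).getD
              (origen, destino) 0)) := by
  set alf := PySem.List.sorted (PySem.Set.ofList l) (fun x => x) false with half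
  set N := alf.length with hN
  have hnd : alf.Nodup := ((PySem.List.sorted_perm _ _ _).symm).nodup (PySem.Set.nodup_ofList l)
  have hmem : ∀ c ∈ l, c ∈ alf := by
    intro c hc
    rw [half, PySem.List.mem_sorted, PySem.Set.mem_ofList]
    exact hc
  -- the pair-count dictionary is Counter(pares)
  have hslice : PySem.List.slice l (some 1) none = l.tail := by
    rw [PySem.List.slice_from l (by norm_num)]
    norm_num [List.drop_one]
  rw [hslice, PySem.Dict.foldl_insert_getD_add_one_eq_counter]
  rcases Nat.eq_zero_or_pos l.length with hL | hL
  · rw [List.eq_nil_iff_length_eq_zero.mpr hL] at half ⊢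
    simp [half, hN]
  -- nonempty case
  have hlen : PySem.List.len l - 1 = ((l.length - 1 : Nat) : Int) := by
    rw [PySem.List.len_eq]; omega
  rw [hlen, PySem.List.pyRange_zero_natCast, List.foldl_map]
  have hcong : ∀ (m : List (List Int)), ∀ k ∈ List.range (l.length - 1),
      (fun matriz (i : Int) =>
        match PySem.List.pyGet? l i, PySem.List.pyGet? l (i + 1) with
        | some ci, some ci1 =>
          match PySem.List.index? alf ci, PySem.List.index? alf ci1 with
          | some origen, some destino => matriz.modify destino (fun fila => fila.modify origen (· + 1))
          | _, _ => matriz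
        | _, _ => matriz) m (k : Int)
      = pvStep m (alf.idxOf (l.getD (k + 1) 'a'), alf.idxOf (l.getD k 'a')) := by
    intro m k hk
    rw [List.mem_range] at hk
    have hk1 : k < l.length := by omega
    have hk2 : k + 1 < l.length := by omega
    have g1 : PySem.List.pyGet? l (k : Int) = some l[k] := by
      rw [PySem.List.pyGet?_natCast, List.getElem?_eq_getElem hk1]
    have g2 : PySem.List.pyGet? l ((k : Int) + 1) = some l[k + 1] := by
      rw [show ((k : Int) + 1) = ((k + 1 : Nat) : Int) by push_cast; ring,
        PySem.List.pyGet?_natCast, List.getElem?_eq_getElem hk2]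
    have i1 : PySem.List.index? alf l[k] = some (alf.idxOf l[k]) := by
      rw [PySem.List.index?_eq_idxOf?, pvIdxOf?_of_mem (hmem _ (l.getElem_mem hk1))]
    have i2 : PySem.List.index? alf l[k + 1] = some (alf.idxOf l[k + 1]) := by
      rw [PySem.List.index?_eq_idxOf?, pvIdxOf?_of_mem (hmem _ (l.getElem_mem hk2))]
    simp only [g1, g2, i1, i2, List.getD_eq_getElem l 'a' hk1, List.getD_eq_getElem l 'a' hk2]
    rfl
  rw [PySem.List.foldl_congr_mem _ _ _ _ hcong, ← List.foldl_map]
  set js := (List.range (l.length - 1)).map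
    (fun k => (alf.idxOf (l.getD (k + 1) 'a'), alf.idxOf (l.getD k 'a'))) with hjs
  set m0 := (List.range N).map (fun _ => (List.range N).map (fun _ => (0 : Int))) with hm0
  have hm0row : ∀ d, d < N → m0.getD d [] = (List.range N).map (fun _ => (0 : Int)) := by
    intro d hd
    rw [hm0, List.getD_eq_getElem _ _ (by simpa using hd), List.getElem_map]
  -- index pairs vs character pairs
  have hjs_eq : js = (l.zip l.tail).map (fun p => (alf.idxOf p.2, alf.idxOf p.1)) := by
    apply List.ext_getElem
    · simp [hjs, List.length_zip]
    · intro k h1 h2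
      have hk : k < l.length - 1 := by simpa [hjs] using h1
      have hk1 : k < l.length := by omega
      have hk2 : k + 1 < l.length := by omega
      simp only [hjs, List.getElem_map, List.getElem_range, List.getElem_zip,
        List.getElem_tail, List.getD_eq_getElem l 'a' hk1, List.getD_eq_getElem l 'a' hk2]
  have hidx : ∀ (c : Char), c ∈ l → ∀ (j : Nat) (hj : j < N), alf.idxOf c = j ↔ c = alf[j]'hj := by
    intro c hc j hj
    constructor
    · intro h
      subst h
      exact (List.getElem_idxOf (List.idxOf_lt_length_of_mem (hmem c hc))).symm
    · intro h
      rw [h]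
      exact hnd.idxOf_getElem j hj
  apply List.ext_getElem
  · rw [pvLen_foldl, hm0]; simp only [List.length_map, List.length_range]
    exact hN
  · intro d hd1 hd2
    have hdN : d < N := by simpa using hd2
    apply List.ext_getElem
    · rw [List.getElem_map]
      rw [← List.getD_eq_getElem _ [] hd1, pvRow_len_foldl, hm0row d hdN]
      simp only [List.length_map, List.length_range]
      exact hN
    · intro o ho1 ho2
      have hoN : o < N := by
        rw [← List.getD_eq_getElem _ [] hd1, pvRow_len_foldl, hm0row d hdN] at ho1
        simpa using ho1
      have hcell : (js.foldl pvStep m0)[d][o] = pvCell (js.foldl pvStep m0) d o := by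
        rw [pvCell, List.getD_eq_getElem _ [] hd1, List.getD_eq_getElem _ 0 ho1]
      have hm0cell : pvCell m0 d o = 0 := by
        rw [pvCell, hm0row d hdN, List.getD_eq_getElem _ 0 (by simpa using hoN), List.getElem_map]
      have hlhs : (js.foldl pvStep m0)[d][o] = (js.count (d, o) : Int) := by
        rw [hcell, pvCell_foldl js m0 d o (by rw [hm0row d hdN]; simpa using hoN), hm0cell, zero_add]
      have hrhs : ((alf.map (fun destino => alf.map (fun origen =>
          (PySem.Dict.counter (l.zip l.tail)).getD (origen, destino) 0)))[d]'hd2)[o]'ho2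
          = ((l.zip l.tail).count (alf[o]'hoN, alf[d]'hdN) : Int) := by
        simp only [List.getElem_map]
        rw [PySem.Dict.getD_counter]
      rw [hlhs, hrhs]
      congr 1
      rw [hjs_eq, List.count_eq_countP, List.count_eq_countP, List.countP_map]
      apply List.countP_congr
      intro p hp
      obtain ⟨hp1, hp2t⟩ := List.of_mem_zip (a := p.1) (b := p.2) (by simpa using hp)
      have hp2 : p.2 ∈ l := List.mem_of_mem_tail hp2t
      simp only [Function.comp_apply, beq_iff_eq, Prod.ext_iff]
      rw [hidx p.2 hp2 d hdN, hidx p.1 hp1 o hoN]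
      tauto

theorem genMatrizOcurrencias_spec : Claim_equal_genMatrizOcurrencias := by
  intro cadena _
  exact pvMain cadena.toList
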